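-- pv_equiv track=rewrite | github.com/epitts1013/CSC-442-Chimera | FTP-Covert-Message/FTPMessageDecoder_1.py | BitDecoder
-- ===== SOURCE A (Python) =====
-- def BitDecoder(files, length):
-- 	permissions = ""
-- 	for f in files:
-- 	        file_permissions = f[0:length]
-- 	        bin_rep = ""
-- 	        for i in file_permissions:
-- 	                if(i == "-"):
-- 	                        bin_rep += "0"
-- 	                else:
-- 	                        bin_rep += "1"
--
-- 	        permissions += bin_rep
--
-- 	msg = ""
-- 	for i in range(0,len(permissions),7):
-- 	        msg += chr(int(permissions[i:i+7],2))
-- 	return(msg)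
-- ===== SOURCE B (Python) =====
-- def BitDecoder(files, length):
--     out = []
--     val = 0
--     count = 0
--     for f in files:
--         for ch in f[0:length]:
--             val = val * 2 + (0 if ch == "-" else 1)
--             count += 1
--             if count == 7:
--                 out.append(chr(val))
--                 val = 0
--                 count = 0
--     if count > 0:
--         out.append(chr(val))
--     return "".join(out)
-- ===== Notes on version B (the rewrite author's own statement) =====
-- stated objective: alternative
-- what changed: B drops A's intermediate '0'/'1' binary string and base-2 reparsing of each 7-char slice: a single streaming pass keeps an integer accumulator and a bit counter across file boundaries, emitting a character every 7 bits and flushing a trailing partial chunk.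
import Mathlib
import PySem

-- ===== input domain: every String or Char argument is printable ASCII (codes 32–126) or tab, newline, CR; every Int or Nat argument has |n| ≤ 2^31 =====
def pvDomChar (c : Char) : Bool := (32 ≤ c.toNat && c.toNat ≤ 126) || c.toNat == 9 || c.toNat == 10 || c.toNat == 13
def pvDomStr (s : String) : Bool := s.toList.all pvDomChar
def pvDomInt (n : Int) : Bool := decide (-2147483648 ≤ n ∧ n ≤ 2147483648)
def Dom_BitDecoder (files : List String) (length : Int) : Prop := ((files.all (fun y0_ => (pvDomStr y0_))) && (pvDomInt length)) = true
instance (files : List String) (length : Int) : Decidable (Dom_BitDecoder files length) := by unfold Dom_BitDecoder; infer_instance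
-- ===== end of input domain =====

-- B replaces A's intermediate binary string + per-chunk base-2 reparse by one streaming
-- pass with an integer accumulator and a bit counter (alternative decomposition, same cost).

-- ===== PORT A =====
-- hand port of int(s, 2); exact on the nonempty '0'/'1'-only strings this program forms
def parseBin2 (cs : List Char) : Int :=
  cs.foldl (fun a c => a * 2 + (if c = '1' then 1 else 0)) 0

def BitDecoder (files : List String) (length : Int) : String :=
  let permissions : List Char :=
    files.foldl (fun permissions f =>
      let file_permissions := PySem.List.slice f.toList (some 0) (some length)
      let bin_rep := file_permissions.foldl
        (fun bin_rep i => bin_rep ++ [if i = '-' then '0' else '1']) []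
      permissions ++ bin_rep) []
  let msg : List Char :=
    (PySem.List.pyRange 0 (permissions.length : Int) 7).foldl
      (fun msg i =>
        msg ++ [Char.ofNat (parseBin2 (PySem.List.slice permissions (some i) (some (i + 7)))).toNat]) []
  String.ofList msg

-- ===== PORT B =====
-- loop body of Source B: fold the next permission char into (out, val, count)
def altStep (st : List Char × Int × Int) (ch : Char) : List Char × Int × Int :=
  let val := st.2.1 * 2 + (if ch = '-' then 0 else 1)
  let count := st.2.2 + 1
  if count = 7 then (st.1 ++ [Char.ofNat val.toNat], 0, 0) else (st.1, val, count)

def BitDecoder_alt (files : List String) (length : Int) : String :=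
  let st := files.foldl
    (fun st f => (PySem.List.slice f.toList (some 0) (some length)).foldl altStep st)
    ([], 0, 0)
  String.ofList (if 0 < st.2.2 then st.1 ++ [Char.ofNat st.2.1.toNat] else st.1)

-- ===== PRECONDITION & SPEC =====
def Spec_BitDecoder (files : List String) (length : Int) (out : String) : Prop := out = BitDecoder_alt files length
instance (files : List String) (length : Int) (out : String) : Decidable (Spec_BitDecoder files length out) := by unfold Spec_BitDecoder; infer_instance

-- ===== CLAIM (what is proved, stated in full; the proofs are below) =====
def Claim_equal_BitDecoder : Prop := ∀ (files : List String) (length : Int), Dom_BitDecoder files length → Spec_BitDecoder files length (BitDecoder files length)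

-- ===== LEMMAS AND PROOFS =====

-- streaming accumulator of B over a raw permission-char list
def bacc (v : Int) (cs : List Char) : Int :=
  cs.foldl (fun a c => a * 2 + (if c = '-' then 0 else 1)) v

-- common specification: the decoded message, chunk by chunk
def decodeSpec (cs : List Char) : List Char :=
  (List.range ((cs.length + 6) / 7)).map
    (fun k => Char.ofNat (bacc 0 ((cs.drop (7 * k)).take 7)).toNat)

lemma decodeSpec_nil : decodeSpec [] = [] := by simp [decodeSpec]

lemma decodeSpec_cons (cs : List Char) (h : cs ≠ []) :
    decodeSpec cs = Char.ofNat (bacc 0 (cs.take 7)).toNat :: decodeSpec (cs.drop 7) := by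
  have hn : 0 < cs.length := List.length_pos_iff.mpr h
  have hm : (cs.length + 6) / 7 = ((cs.drop 7).length + 6) / 7 + 1 := by
    simp only [List.length_drop]; omega
  rw [decodeSpec, hm, List.range_succ_eq_map]
  simp [decodeSpec, List.map_map, Function.comp_def, Nat.mul_add, List.drop_drop,
    Nat.add_comm]

lemma foldl7 (cs : List Char) : ∀ (out : List Char) (v c : Int), 0 ≤ c → c < 7 →
    c + (cs.length : Int) ≤ 7 →
    cs.foldl altStep (out, v, c) =
      if c + (cs.length : Int) = 7 then (out ++ [Char.ofNat (bacc v cs).toNat], 0, 0)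
      else (out, bacc v cs, c + (cs.length : Int)) := by
  induction cs with
  | nil => intro out v c h0 h7 _; simp [bacc]; omega
  | cons ch t ih =>
    intro out v c h0 h7 hle
    simp only [List.foldl_cons, altStep]
    by_cases hc : c + 1 = 7
    · have ht : t = [] := by
        cases t with
        | nil => rfl
        | cons a u => exfalso; simp at hle; omega
      subst ht
      simp [hc, bacc]
    · have h1 : c + 1 < 7 := by
        rcases lt_or_eq_of_le (by omega : c + 1 ≤ 7) with h | h
        · exact h
        · exact absurd h hc
      rw [if_neg hc, ih out (v * 2 + (if ch = '-' then 0 else 1)) (c + 1) (by omega) h1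
        (by simp at hle ⊢; omega)]
      have harr : c + 1 + (t.length : Int) = c + ((t.length : Int) + 1) := by ring
      simp only [List.length_cons, Nat.cast_add, Nat.cast_one, bacc, List.foldl_cons, harr]

lemma flush_foldl : ∀ (n : Nat) (cs : List Char), cs.length = n → ∀ out : List Char,
    (let st := cs.foldl altStep (out, 0, 0)
     if 0 < st.2.2 then st.1 ++ [Char.ofNat st.2.1.toNat] else st.1) = out ++ decodeSpec cs := by
  intro n
  induction n using Nat.strong_induction_on with
  | _ n ih =>
    intro cs hlen out
    by_cases hnil : cs = []
    · subst hnil; simp [decodeSpec_nil]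
    by_cases hlt : cs.length < 7
    · have := foldl7 cs out 0 0 le_rfl (by omega) (by omega)
      rw [if_neg (by omega)] at this
      simp only [this]
      have hpos : (0 : Int) < 0 + (cs.length : Int) := by
        have : cs.length ≠ 0 := fun h => hnil (List.length_eq_zero_iff.mp h)
        omega
      rw [if_pos hpos, decodeSpec_cons cs hnil]
      have h1 : cs.take 7 = cs := List.take_of_length_le (by omega)
      have h2 : cs.drop 7 = [] := List.drop_of_length_le (by omega)
      simp [h1, h2, decodeSpec_nil]
    · have hsplit : cs = cs.take 7 ++ cs.drop 7 := (List.take_append_drop 7 cs).symm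
      have hlen7 : (cs.take 7).length = 7 := by simp; omega
      rw [hsplit, List.foldl_append]
      have := foldl7 (cs.take 7) out 0 0 le_rfl (by omega) (by rw [hlen7]; simp)
      rw [if_pos (by rw [hlen7]; simp)] at this
      rw [this]
      have hrec := ih (cs.drop 7).length (by simp; omega) (cs.drop 7) rfl
        (out ++ [Char.ofNat (bacc 0 (cs.take 7)).toNat])
      simp only at hrec ⊢
      rw [hrec, ← hsplit, decodeSpec_cons cs hnil]
      simp

-- nested per-file folding equals folding over the concatenation of all files' slices
lemma foldl_foldl_flatMap {α β γ : Type} (g : α → List β) (step : γ → β → γ) :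
    ∀ (l : List α) (init : γ),
      l.foldl (fun st f => (g f).foldl step st) init = (l.flatMap g).foldl step init := by
  intro l
  induction l with
  | nil => intro init; simp
  | cons f t ih => intro init; simp [List.foldl_append, ih]

lemma parseBin2_map (cs : List Char) :
    parseBin2 (cs.map (fun i => if i = '-' then '0' else '1')) = bacc 0 cs := by
  rw [parseBin2, bacc, List.foldl_map]
  apply PySem.List.foldl_congr_mem
  intro a c _
  by_cases h : c = '-' <;> simp [h]

-- A's chunk-reparsing message loop over the mapped '0'/'1' string computes decodeSpec
lemma A_decode (rs : List Char) :
    (PySem.List.pyRange 0 (((rs.map (fun i => if i = '-' then '0' else '1')).length : Int)) 7).foldl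
      (fun msg i =>
        msg ++ [Char.ofNat (parseBin2 (PySem.List.slice
          (rs.map (fun i => if i = '-' then '0' else '1')) (some i) (some (i + 7)))).toNat]) [] =
    decodeSpec rs := by
  rw [PySem.List.foldl_append_singleton_eq_map, List.nil_append,
    PySem.List.pyRange_of_pos 0 _ (by norm_num : (0:Int) < 7), List.map_map]
  have hcnt : (if (0:Int) < (((rs.map (fun i => if i = '-' then '0' else '1')).length : Int)) then
      ((((rs.map (fun i => if i = '-' then '0' else '1')).length : Int) - 0 + 7 - 1) / 7).toNat else 0)
      = (rs.length + 6) / 7 := by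
    simp only [List.length_map]
    by_cases h : rs.length = 0
    · simp [h]
    · rw [if_pos (by exact_mod_cast Nat.pos_of_ne_zero h)]
      omega
  rw [hcnt, decodeSpec]
  apply List.map_congr_left
  intro k _
  simp only [Function.comp_apply]
  have h1 : (0 : Int) + 7 * (k : Int) = ((7 * k : Nat) : Int) := by push_cast; ring
  rw [h1]
  have h2 : ((7 * k : Nat) : Int) + 7 = ((7 * k + 7 : Nat) : Int) := by push_cast; ring
  rw [h2, PySem.List.slice_natCast, ← List.map_drop]
  have h3 : 7 * k + 7 - 7 * k = 7 := by omega
  rw [h3, ← List.map_take, parseBin2_map]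

-- ===== VERDICT (by name: the statement is the Claim_ definition above) =====
theorem BitDecoder_spec : Claim_equal_BitDecoder := by
  intro files length _
  unfold Spec_BitDecoder BitDecoder BitDecoder_alt
  -- the raw concatenated permission characters
  set rs : List Char := files.flatMap (fun f => PySem.List.slice f.toList (some 0) (some length)) with hrs
  -- A's permissions string is rs mapped to '0'/'1'
  have hperm :
      files.foldl (fun permissions f =>
        permissions ++ (PySem.List.slice f.toList (some 0) (some length)).foldl
          (fun bin_rep i => bin_rep ++ [if i = '-' then '0' else '1']) []) [] =
      rs.map (fun i => if i = '-' then '0' else '1') := by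
    have : ∀ (acc : List Char),
        files.foldl (fun permissions f =>
          permissions ++ (PySem.List.slice f.toList (some 0) (some length)).foldl
            (fun bin_rep i => bin_rep ++ [if i = '-' then '0' else '1']) []) acc =
        acc ++ (files.flatMap (fun f =>
          (PySem.List.slice f.toList (some 0) (some length)).map
            (fun i => if i = '-' then '0' else '1'))) := by
      intro acc
      have := PySem.List.foldl_append_eq_flatMap
        (g := fun f => (PySem.List.slice f.toList (some 0) (some length)).map
          (fun i => if i = '-' then '0' else '1')) (l := files) (acc := acc)
      rw [← this]
      apply PySem.List.foldl_congr_mem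
      intro a f _
      rw [PySem.List.foldl_append_singleton_eq_map]
      simp
    rw [this []]
    simp [hrs, List.map_flatMap]
  have hB := foldl_foldl_flatMap
    (fun f => PySem.List.slice (String.toList f) (some 0) (some length)) altStep files ([], 0, 0)
  have hflush := flush_foldl rs.length rs rfl []
  simp only at hflush
  simp only [hperm, ← hrs, hB, hflush, A_decode, List.nil_append]
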